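-- pv_equiv track=rewrite | github.com/ozooxo/HowManyBlocks | algorithm.py | RandomBlockSet2FilledBlockSet
-- ===== SOURCE A (Python) =====
-- def BlockSet2oneDimProjection(BlockSet):
--     xSet, ySet, zSet = set(), set(), set()
--     for Block in BlockSet:
--         xSet.add(Block[0])
--         ySet.add(Block[1])
--         zSet.add(Block[2])
--     return (xSet, ySet, zSet)
--
-- def BlockSet2twoDimProjection(BlockSet):
--     xySet, yzSet, xzSet = set(), set(), set()
--     for Block in BlockSet:
--         xySet.add((Block[0], Block[1]))
--         yzSet.add((Block[1], Block[2]))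
--         xzSet.add((Block[0], Block[2]))
--     return (xySet, yzSet, xzSet)
--
-- def RandomBlockSet2FilledBlockSet(RandomBlockSet):
--     xSet, ySet, zSet = BlockSet2oneDimProjection(RandomBlockSet)
--     xySet, yzSet, xzSet = BlockSet2twoDimProjection(RandomBlockSet)
--
--     FilledBlockSet = set()
--     xyz_grid = {(x, y, z) for x in xSet for y in ySet for z in zSet}
--     for (x,y,z) in xyz_grid:
--         if ((x,y) in xySet) and ((y,z) in yzSet) and ((x,z) in xzSet):
--             FilledBlockSet.add((x,y,z))
--     return FilledBlockSet
-- ===== SOURCE B (Python) =====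
-- def RandomBlockSet2FilledBlockSet(RandomBlockSet):
--     x2z = {}      # x -> set of z appearing with that x  (= xzSet indexed by x)
--     y2z = {}      # y -> set of z appearing with that y  (= yzSet indexed by y)
--     xySet = set()
--     for (x, y, z) in RandomBlockSet:
--         x2z.setdefault(x, set()).add(z)
--         y2z.setdefault(y, set()).add(z)
--         xySet.add((x, y))
--     FilledBlockSet = set()
--     for (x, y) in xySet:
--         for z in x2z[x] & y2z[y]:
--             FilledBlockSet.add((x, y, z))
--     return FilledBlockSet
-- ===== Notes on version B (the rewrite author's own statement) =====
-- stated objective: faster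
-- what changed: Instead of materialising and filtering the full |X|*|Y|*|Z| Cartesian grid, B indexes the xz-projection by x and the yz-projection by y in one pass and, for each (x,y) in the xy-projection only, emits the intersection of the two z-sets.
import Mathlib
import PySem

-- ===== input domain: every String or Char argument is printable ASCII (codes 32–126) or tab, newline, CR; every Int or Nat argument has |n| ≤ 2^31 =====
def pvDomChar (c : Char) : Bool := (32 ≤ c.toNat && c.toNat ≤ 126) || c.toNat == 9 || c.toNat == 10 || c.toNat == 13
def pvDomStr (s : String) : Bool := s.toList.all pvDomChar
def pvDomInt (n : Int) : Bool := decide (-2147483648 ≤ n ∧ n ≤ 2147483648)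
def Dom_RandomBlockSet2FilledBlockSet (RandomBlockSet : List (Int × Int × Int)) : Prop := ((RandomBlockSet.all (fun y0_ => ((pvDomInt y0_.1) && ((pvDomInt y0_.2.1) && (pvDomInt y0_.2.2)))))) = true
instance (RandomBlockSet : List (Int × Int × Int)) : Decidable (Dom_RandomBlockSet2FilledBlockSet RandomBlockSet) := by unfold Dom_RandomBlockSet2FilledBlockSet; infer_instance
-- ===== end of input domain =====

-- B replaces A's filtered |X|*|Y|*|Z| Cartesian grid by indexing the xz-projection by x and the
-- yz-projection by y and intersecting the two z-sets for each (x,y) of the xy-projection.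
-- Both functions RETURN a Python set, whose iteration order is unspecified; the ports model every
-- set iteration in sorted (lexicographic) order — the results, being sets, do not depend on it.

-- ===== PORT A =====
def BlockSet2oneDimProjection (BlockSet : List (Int × Int × Int)) :
    PySem.Set Int × PySem.Set Int × PySem.Set Int :=
  BlockSet.foldl
    (fun s Block =>
      (PySem.Set.add s.1 Block.1, PySem.Set.add s.2.1 Block.2.1, PySem.Set.add s.2.2 Block.2.2))
    (PySem.Set.empty, PySem.Set.empty, PySem.Set.empty)

def BlockSet2twoDimProjection (BlockSet : List (Int × Int × Int)) :
    PySem.Set (Int × Int) × PySem.Set (Int × Int) × PySem.Set (Int × Int) :=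
  BlockSet.foldl
    (fun s Block =>
      (PySem.Set.add s.1 (Block.1, Block.2.1), PySem.Set.add s.2.1 (Block.2.1, Block.2.2),
       PySem.Set.add s.2.2 (Block.1, Block.2.2)))
    (PySem.Set.empty, PySem.Set.empty, PySem.Set.empty)

def RandomBlockSet2FilledBlockSet (RandomBlockSet : List (Int × Int × Int)) : List (Int × Int × Int) :=
  let od := BlockSet2oneDimProjection RandomBlockSet
  let td := BlockSet2twoDimProjection RandomBlockSet
  -- xyz_grid = {(x, y, z) for x in xSet for y in ySet for z in zSet}; it is a set iterated only to
  -- build another set, so 'for (x,y,z) in xyz_grid' is modelled in sorted (lexicographic) order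
  let grid : List (Int × Int × Int) :=
    (PySem.List.sorted od.1 (fun v => v)).flatMap fun x =>
      (PySem.List.sorted od.2.1 (fun v => v)).flatMap fun y =>
        (PySem.List.sorted od.2.2 (fun v => v)).map fun z => (x, y, z)
  grid.foldl
    (fun acc t =>
      if (PySem.Set.contains td.1 (t.1, t.2.1) && PySem.Set.contains td.2.1 (t.2.1, t.2.2))
           && PySem.Set.contains td.2.2 (t.1, t.2.2)
      then PySem.Set.add acc t else acc)
    PySem.Set.empty

-- ===== PORT B =====
def RandomBlockSet2FilledBlockSet_alt (RandomBlockSet : List (Int × Int × Int)) : List (Int × Int × Int) :=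
  -- one pass: x2z (x -> set of z), y2z (y -> set of z), xySet
  let st := RandomBlockSet.foldl
    (fun st b =>
      (PySem.Dict.modify st.1 b.1 PySem.Set.empty (fun s => PySem.Set.add s b.2.2),
       PySem.Dict.modify st.2.1 b.2.1 PySem.Set.empty (fun s => PySem.Set.add s b.2.2),
       PySem.Set.add st.2.2 (b.1, b.2.1)))
    (PySem.Dict.empty, PySem.Dict.empty, PySem.Set.empty)
  -- 'for (x,y) in xySet' and 'for z in x2z[x] & y2z[y]' iterate sets only to build a set:
  -- modelled in sorted order
  (PySem.List.sorted st.2.2 (fun p => toLex p)).foldl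
    (fun acc p =>
      (PySem.List.sorted
          (PySem.Set.inter (PySem.Dict.getD st.1 p.1 PySem.Set.empty)
                           (PySem.Dict.getD st.2.1 p.2 PySem.Set.empty))
          (fun v => v)).foldl
        (fun acc z => PySem.Set.add acc (p.1, p.2, z)) acc)
    PySem.Set.empty

-- ===== PRECONDITION & SPEC =====
def Spec_RandomBlockSet2FilledBlockSet (RandomBlockSet : List (Int × Int × Int)) (out : List (Int × Int × Int)) : Prop := out = RandomBlockSet2FilledBlockSet_alt RandomBlockSet
instance (RandomBlockSet : List (Int × Int × Int)) (out : List (Int × Int × Int)) : Decidable (Spec_RandomBlockSet2FilledBlockSet RandomBlockSet out) := by unfold Spec_RandomBlockSet2FilledBlockSet; infer_instance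

-- ===== CLAIM (what is proved, stated in full; the proofs are below) =====
def Claim_equal_RandomBlockSet2FilledBlockSet : Prop := ∀ (RandomBlockSet : List (Int × Int × Int)), Dom_RandomBlockSet2FilledBlockSet RandomBlockSet → Spec_RandomBlockSet2FilledBlockSet RandomBlockSet (RandomBlockSet2FilledBlockSet RandomBlockSet)

-- ===== LEMMAS AND PROOFS =====

-- the lexicographic key on triples both outputs are sorted by
def pvKey3 (t : Int × Int × Int) : Lex (Int × Lex (Int × Int)) := toLex (t.1, toLex (t.2.1, t.2.2))

theorem pvKey3_inj : Function.Injective pvKey3 := by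
  intro a b h
  simp only [pvKey3] at h
  have h1 := congrArg (fun p => (ofLex p).1) h
  have h2 := congrArg (fun p => (ofLex ((ofLex p).2)).1) h
  have h3 := congrArg (fun p => (ofLex ((ofLex p).2)).2) h
  simp at h1 h2 h3
  exact Prod.ext h1 (Prod.ext h2 h3)

-- a loop with three independent accumulators is three loops
theorem pvFoldlSplit3 {β σ₁ σ₂ σ₃ : Type} (f₁ : σ₁ → β → σ₁) (f₂ : σ₂ → β → σ₂) (f₃ : σ₃ → β → σ₃)
    (l : List β) (a : σ₁) (b : σ₂) (c : σ₃) :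
    l.foldl (fun s e => (f₁ s.1 e, f₂ s.2.1 e, f₃ s.2.2 e)) (a, b, c)
      = (l.foldl f₁ a, l.foldl f₂ b, l.foldl f₃ c) := by
  induction l generalizing a b c with
  | nil => rfl
  | cons x t ih => simp only [List.foldl]; exact ih _ _ _

-- group-by loop: the z-set stored under key c after the modify-loop
theorem pvGetDFold (k : Int × Int × Int → Int) (v : Int × Int × Int → Int)
    (l : List (Int × Int × Int)) (d : PySem.Dict Int (PySem.Set Int)) (c : Int) :
    (l.foldl (fun d b => d.modify (k b) PySem.Set.empty (fun s => PySem.Set.add s (v b))) d).getD c PySem.Set.empty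
      = PySem.Set.update (d.getD c PySem.Set.empty) ((l.filter (fun b => k b == c)).map v) := by
  induction l generalizing d with
  | nil => simp [PySem.Set.update]
  | cons b t ih =>
    simp only [List.foldl, List.filter]
    by_cases hb : k b = c
    · simp only [hb, beq_self_eq_true]
      rw [ih, PySem.Dict.getD_modify]
      simp [PySem.Set.update_cons]
    · have : (k b == c) = false := by simp [hb]
      simp only [this]
      rw [ih, PySem.Dict.getD_modify]
      simp [Ne.symm hb]

-- a loop of set-updates is one update by the concatenation
theorem pvFoldlUpdate {α β : Type} [BEq α] (P : List β) (G : β → List α) (s : PySem.Set α) :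
    P.foldl (fun acc p => PySem.Set.update acc (G p)) s = PySem.Set.update s (P.flatMap G) := by
  induction P generalizing s with
  | nil => simp [PySem.Set.update]
  | cons p t ih => simp only [List.foldl, List.flatMap_cons]; rw [ih, PySem.Set.update_append]

-- pairwise of a flatMap: sorted blocks listed in increasing block order
theorem pvPairwiseFlatMap {α β : Type} (r : α → α → Prop) (s : β → β → Prop)
    (P : List α) (G : α → List β)
    (hP : P.Pairwise r) (hin : ∀ p ∈ P, (G p).Pairwise s)
    (hcross : ∀ p q, r p q → ∀ a ∈ G p, ∀ b ∈ G q, s a b) :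
    (P.flatMap G).Pairwise s := by
  induction P with
  | nil => simp
  | cons p t ih =>
    rw [List.flatMap_cons, List.pairwise_append]
    rcases List.pairwise_cons.mp hP with ⟨hpt, ht⟩
    refine ⟨hin p (by simp), ih ht (fun q hq => hin q (by simp [hq])), ?_⟩
    intro a ha b hb
    rcases List.mem_flatMap.mp hb with ⟨q, hq, hbq⟩
    exact hcross p q (hpt q hq) a ha b hbq

-- sorted distinct elements are strictly increasing under the key
theorem pvSortedStrict {α κ : Type} [LinearOrder κ] (xs : List α) (key : α → κ)
    (hnd : xs.Nodup) (hinj : Function.Injective key) :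
    (PySem.List.sorted xs key).Pairwise (fun a b => key a < key b) := by
  have hp := PySem.List.sorted_pairwise xs key
  have hnd' : (PySem.List.sorted xs key).Nodup :=
    (PySem.List.sorted_perm xs key false).nodup_iff.mpr hnd
  have := List.Pairwise.and hp hnd'
  exact this.imp (fun {a b} h => lt_of_le_of_ne h.1 (fun he => h.2 (hinj he)))

-- strictly-increasing lists with the same members are equal
theorem pvSortedExt {α κ : Type} [LinearOrder κ] (key : α → κ) (hinj : Function.Injective key)
    (l₁ l₂ : List α)
    (h₁ : l₁.Pairwise (fun a b => key a < key b)) (h₂ : l₂.Pairwise (fun a b => key a < key b))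
    (hm : ∀ t, t ∈ l₁ ↔ t ∈ l₂) : l₁ = l₂ := by
  have hnd₁ : l₁.Nodup := h₁.imp (fun {a b} h => fun he => absurd (he ▸ h) (lt_irrefl _))
  have hnd₂ : l₂.Nodup := h₂.imp (fun {a b} h => fun he => absurd (he ▸ h) (lt_irrefl _))
  have hperm : l₁.Perm l₂ := (List.perm_ext_iff_of_nodup hnd₁ hnd₂).mpr hm
  exact List.Perm.eq_of_pairwise
    (fun a b _ _ hab hba => hinj (le_antisymm hab hba))
    (h₁.imp (fun {a b} h => le_of_lt h)) (h₂.imp (fun {a b} h => le_of_lt h)) hperm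

-- the six projection sets, in closed form
def pvXs (R : List (Int × Int × Int)) : PySem.Set Int := PySem.Set.ofList (R.map (·.1))
def pvYs (R : List (Int × Int × Int)) : PySem.Set Int := PySem.Set.ofList (R.map (·.2.1))
def pvZs (R : List (Int × Int × Int)) : PySem.Set Int := PySem.Set.ofList (R.map (·.2.2))
def pvXY (R : List (Int × Int × Int)) : PySem.Set (Int × Int) := PySem.Set.ofList (R.map (fun b => (b.1, b.2.1)))
def pvYZ (R : List (Int × Int × Int)) : PySem.Set (Int × Int) := PySem.Set.ofList (R.map (fun b => (b.2.1, b.2.2)))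
def pvXZ (R : List (Int × Int × Int)) : PySem.Set (Int × Int) := PySem.Set.ofList (R.map (fun b => (b.1, b.2.2)))
def pvZx (R : List (Int × Int × Int)) (x : Int) : PySem.Set Int :=
  PySem.Set.ofList ((R.filter (fun b => b.1 == x)).map (·.2.2))
def pvZy (R : List (Int × Int × Int)) (y : Int) : PySem.Set Int :=
  PySem.Set.ofList ((R.filter (fun b => b.2.1 == y)).map (·.2.2))

-- A's grid list and filter condition
def pvLA (R : List (Int × Int × Int)) : List (Int × Int × Int) :=
  (PySem.List.sorted (pvXs R) (fun v => v)).flatMap fun x =>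
    (PySem.List.sorted (pvYs R) (fun v => v)).flatMap fun y =>
      (PySem.List.sorted (pvZs R) (fun v => v)).map fun z => (x, y, z)
def pvCond (R : List (Int × Int × Int)) (t : Int × Int × Int) : Bool :=
  (PySem.Set.contains (pvXY R) (t.1, t.2.1) && PySem.Set.contains (pvYZ R) (t.2.1, t.2.2))
    && PySem.Set.contains (pvXZ R) (t.1, t.2.2)

-- B's emission list
def pvLB (R : List (Int × Int × Int)) : List (Int × Int × Int) :=
  (PySem.List.sorted (pvXY R) (fun p => toLex p)).flatMap fun p =>
    (PySem.List.sorted (PySem.Set.inter (pvZx R p.1) (pvZy R p.2)) (fun v => v)).map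
      fun z => (p.1, p.2, z)

theorem pvOfList_foldl_add {α : Type} [BEq α] {β : Type} (l : List β) (f : β → α) :
    l.foldl (fun s b => PySem.Set.add s (f b)) PySem.Set.empty = PySem.Set.ofList (l.map f) := by
  rw [show (PySem.Set.empty : PySem.Set α) = [] from rfl,
      ← PySem.Set.update_map_eq_foldl_add, PySem.Set.update_nil_left]

theorem pvA_eq (R : List (Int × Int × Int)) :
    RandomBlockSet2FilledBlockSet R = PySem.Set.ofList ((pvLA R).filter (pvCond R)) := by
  unfold RandomBlockSet2FilledBlockSet BlockSet2oneDimProjection BlockSet2twoDimProjection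
  rw [pvFoldlSplit3 (fun s (b : Int × Int × Int) => PySem.Set.add s b.1)
        (fun s b => PySem.Set.add s b.2.1) (fun s b => PySem.Set.add s b.2.2),
      pvFoldlSplit3 (fun s (b : Int × Int × Int) => PySem.Set.add s (b.1, b.2.1))
        (fun s b => PySem.Set.add s (b.2.1, b.2.2)) (fun s b => PySem.Set.add s (b.1, b.2.2))]
  rw [PySem.List.foldl_if_eq_foldl_filter]
  rw [show (PySem.Set.empty : PySem.Set (Int × Int × Int)) = [] from rfl,
      ← PySem.Set.ofList_eq_foldl]
  simp only [pvOfList_foldl_add]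
  rfl

-- the xy-loop of B: a fold of per-pair set extensions is one update by the flatMap
theorem pvFoldlInner (P : List (Int × Int)) (W : Int × Int → PySem.Set Int)
    (s : PySem.Set (Int × Int × Int)) :
    P.foldl (fun acc p =>
        (PySem.List.sorted (W p) (fun v => v)).foldl
          (fun acc z => PySem.Set.add acc (p.1, p.2, z)) acc) s
      = PySem.Set.update s
          (P.flatMap fun p =>
            (PySem.List.sorted (W p) (fun v => v)).map (fun z => (p.1, p.2, z))) := by
  have h : (fun (acc : PySem.Set (Int × Int × Int)) (p : Int × Int) =>
        (PySem.List.sorted (W p) (fun v => v)).foldl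
          (fun acc z => PySem.Set.add acc (p.1, p.2, z)) acc)
      = (fun acc p =>
          PySem.Set.update acc
            ((PySem.List.sorted (W p) (fun v => v)).map (fun z => (p.1, p.2, z)))) := by
    funext acc p
    rw [PySem.Set.update_map_eq_foldl_add]
  rw [h, pvFoldlUpdate]

theorem pvB_eq (R : List (Int × Int × Int)) :
    RandomBlockSet2FilledBlockSet_alt R = PySem.Set.ofList (pvLB R) := by
  unfold RandomBlockSet2FilledBlockSet_alt
  rw [pvFoldlSplit3
        (fun d (b : Int × Int × Int) => PySem.Dict.modify d b.1 PySem.Set.empty (fun s => PySem.Set.add s b.2.2))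
        (fun d (b : Int × Int × Int) => PySem.Dict.modify d b.2.1 PySem.Set.empty (fun s => PySem.Set.add s b.2.2))
        (fun s (b : Int × Int × Int) => PySem.Set.add s (b.1, b.2.1))]
  have hZx : ∀ x : Int,
      (R.foldl (fun d b => PySem.Dict.modify d b.1 PySem.Set.empty (fun s => PySem.Set.add s b.2.2)) PySem.Dict.empty).getD x PySem.Set.empty
        = pvZx R x := by
    intro x
    rw [pvGetDFold (k := (·.1)) (v := (·.2.2))]
    simp [pvZx, PySem.Set.update_nil_left]
  have hZy : ∀ y : Int,
      (R.foldl (fun d b => PySem.Dict.modify d b.2.1 PySem.Set.empty (fun s => PySem.Set.add s b.2.2)) PySem.Dict.empty).getD y PySem.Set.empty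
        = pvZy R y := by
    intro y
    rw [pvGetDFold (k := (·.2.1)) (v := (·.2.2))]
    simp [pvZy, PySem.Set.update_nil_left]
  simp only [hZx, hZy, pvOfList_foldl_add]
  rw [pvFoldlInner (W := fun p => PySem.Set.inter (pvZx R p.1) (pvZy R p.2))]
  rw [show (PySem.Set.empty : PySem.Set (Int × Int × Int)) = [] from rfl,
      PySem.Set.update_nil_left]
  rfl

-- lexicographic-order introduction on triples
theorem pvLt3_1 {a b : Int × Int × Int} (h : a.1 < b.1) : pvKey3 a < pvKey3 b := by
  simp [pvKey3, Prod.Lex.toLex_lt_toLex]; omega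
theorem pvLt3_2 {a b : Int × Int × Int} (h1 : a.1 = b.1) (h : a.2.1 < b.2.1) : pvKey3 a < pvKey3 b := by
  simp [pvKey3, Prod.Lex.toLex_lt_toLex]; omega
theorem pvLt3_3 {a b : Int × Int × Int} (h1 : a.1 = b.1) (h2 : a.2.1 = b.2.1) (h : a.2.2 < b.2.2) :
    pvKey3 a < pvKey3 b := by
  simp [pvKey3, Prod.Lex.toLex_lt_toLex]; omega

theorem pvLA_pairwise (R : List (Int × Int × Int)) :
    (pvLA R).Pairwise (fun a b => pvKey3 a < pvKey3 b) := by
  apply pvPairwiseFlatMap (r := (· < ·))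
  · exact pvSortedStrict _ _ (PySem.Set.nodup_ofList _) (fun _ _ h => h)
  · intro x _
    apply pvPairwiseFlatMap (r := (· < ·))
    · exact pvSortedStrict _ _ (PySem.Set.nodup_ofList _) (fun _ _ h => h)
    · intro y _
      refine List.Pairwise.map _ (fun {z z'} h => pvLt3_3 rfl rfl h) ?_
      exact pvSortedStrict _ _ (PySem.Set.nodup_ofList _) (fun _ _ h => h)
    · intro y y' hy a ha b hb
      rcases List.mem_map.mp ha with ⟨z, _, rfl⟩
      rcases List.mem_map.mp hb with ⟨z', _, rfl⟩
      exact pvLt3_2 rfl hy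
  · intro x x' hx a ha b hb
    rcases List.mem_flatMap.mp ha with ⟨y, _, ha'⟩
    rcases List.mem_map.mp ha' with ⟨z, _, rfl⟩
    rcases List.mem_flatMap.mp hb with ⟨y', _, hb'⟩
    rcases List.mem_map.mp hb' with ⟨z', _, rfl⟩
    exact pvLt3_1 hx

theorem pvLB_pairwise (R : List (Int × Int × Int)) :
    (pvLB R).Pairwise (fun a b => pvKey3 a < pvKey3 b) := by
  apply pvPairwiseFlatMap (r := fun p q => toLex p < toLex q)
  · exact pvSortedStrict _ _ (PySem.Set.nodup_ofList _) (fun _ _ h => toLex.injective h)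
  · intro p _
    refine List.Pairwise.map _ (fun {z z'} h => pvLt3_3 rfl rfl h) ?_
    exact pvSortedStrict _ _
      (PySem.Set.nodup_inter _ _ (PySem.Set.nodup_ofList _)) (fun _ _ h => h)
  · intro p q hpq a ha b hb
    rcases List.mem_map.mp ha with ⟨z, _, rfl⟩
    rcases List.mem_map.mp hb with ⟨z', _, rfl⟩
    rcases Prod.Lex.toLex_lt_toLex.mp hpq with h | ⟨h1, h2⟩
    · exact pvLt3_1 h
    · exact pvLt3_2 h1 h2

theorem pvMemFilterLA (R : List (Int × Int × Int)) (t : Int × Int × Int) :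
    t ∈ (pvLA R).filter (pvCond R) ↔
      ((∃ b ∈ R, b.1 = t.1) ∧ (∃ b ∈ R, b.2.1 = t.2.1) ∧ (∃ b ∈ R, b.2.2 = t.2.2))
      ∧ ((∃ b ∈ R, b.1 = t.1 ∧ b.2.1 = t.2.1) ∧ (∃ b ∈ R, b.2.1 = t.2.1 ∧ b.2.2 = t.2.2)
          ∧ (∃ b ∈ R, b.1 = t.1 ∧ b.2.2 = t.2.2)) := by
  obtain ⟨x, y, z⟩ := t
  rw [List.mem_filter]
  constructor
  · rintro ⟨hmem, hcond⟩
    refine ⟨?_, ?_⟩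
    · simp only [pvLA, List.mem_flatMap, List.mem_map] at hmem
      rcases hmem with ⟨x', hx', y', hy', z', hz', he⟩
      obtain ⟨rfl, rfl, rfl⟩ : x' = x ∧ y' = y ∧ z' = z := by
        simpa [Prod.ext_iff] using he
      rw [(PySem.List.sorted_perm _ _ _).mem_iff] at hx' hy' hz'
      simp only [pvXs, pvYs, pvZs, PySem.Set.mem_ofList, List.mem_map] at hx' hy' hz'
      exact ⟨hx'.imp (fun b hb => ⟨hb.1, hb.2⟩), hy'.imp (fun b hb => ⟨hb.1, hb.2⟩),
             hz'.imp (fun b hb => ⟨hb.1, hb.2⟩)⟩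
    · simp only [pvCond, Bool.and_eq_true, PySem.Set.contains_iff, pvXY, pvYZ, pvXZ,
        PySem.Set.mem_ofList, List.mem_map, Prod.ext_iff] at hcond
      obtain ⟨⟨h12, h23⟩, h13⟩ := hcond
      exact ⟨h12.imp (fun b hb => ⟨hb.1, hb.2⟩), h23.imp (fun b hb => ⟨hb.1, hb.2⟩),
             h13.imp (fun b hb => ⟨hb.1, hb.2⟩)⟩
  · rintro ⟨⟨hx, hy, hz⟩, h12, h23, h13⟩
    constructor
    · simp only [pvLA, List.mem_flatMap, List.mem_map]
      refine ⟨x, ?_, y, ?_, z, ?_, rfl⟩ <;>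
        rw [(PySem.List.sorted_perm _ _ _).mem_iff] <;>
        simp only [pvXs, pvYs, pvZs, PySem.Set.mem_ofList, List.mem_map]
      · exact hx.imp (fun b hb => ⟨hb.1, hb.2⟩)
      · exact hy.imp (fun b hb => ⟨hb.1, hb.2⟩)
      · exact hz.imp (fun b hb => ⟨hb.1, hb.2⟩)
    · simp only [pvCond, Bool.and_eq_true, PySem.Set.contains_iff, pvXY, pvYZ, pvXZ,
        PySem.Set.mem_ofList, List.mem_map, Prod.ext_iff]
      exact ⟨⟨h12.imp (fun b hb => ⟨hb.1, hb.2.1, hb.2.2⟩),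
              h23.imp (fun b hb => ⟨hb.1, hb.2.1, hb.2.2⟩)⟩,
             h13.imp (fun b hb => ⟨hb.1, hb.2.1, hb.2.2⟩)⟩

theorem pvMemLB (R : List (Int × Int × Int)) (t : Int × Int × Int) :
    t ∈ pvLB R ↔
      (∃ b ∈ R, b.1 = t.1 ∧ b.2.1 = t.2.1) ∧ (∃ b ∈ R, b.1 = t.1 ∧ b.2.2 = t.2.2)
        ∧ (∃ b ∈ R, b.2.1 = t.2.1 ∧ b.2.2 = t.2.2) := by
  obtain ⟨x, y, z⟩ := t
  simp only [pvLB, List.mem_flatMap, List.mem_map]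
  constructor
  · rintro ⟨p, hp, z', hz', he⟩
    obtain ⟨rfl, rfl, rfl⟩ : p.1 = x ∧ p.2 = y ∧ z' = z := by simpa [Prod.ext_iff] using he
    rw [(PySem.List.sorted_perm _ _ _).mem_iff] at hp hz'
    rw [PySem.Set.mem_inter] at hz'
    simp only [pvXY, pvZx, pvZy, PySem.Set.mem_ofList, List.mem_map, List.mem_filter,
      Prod.ext_iff, beq_iff_eq] at hp hz'
    refine ⟨hp.imp (fun b hb => ⟨hb.1, hb.2.1, hb.2.2⟩), ?_, ?_⟩
    · rcases hz'.1 with ⟨b, ⟨hbR, hb1⟩, hb2⟩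
      exact ⟨b, hbR, hb1, hb2⟩
    · rcases hz'.2 with ⟨b, ⟨hbR, hb1⟩, hb2⟩
      exact ⟨b, hbR, hb1, hb2⟩
  · rintro ⟨h12, h13, h23⟩
    refine ⟨(x, y), ?_, z, ?_, rfl⟩
    · rw [(PySem.List.sorted_perm _ _ _).mem_iff]
      simp only [pvXY, PySem.Set.mem_ofList, List.mem_map, Prod.ext_iff]
      exact h12.imp (fun b hb => ⟨hb.1, hb.2.1, hb.2.2⟩)
    · rw [(PySem.List.sorted_perm _ _ _).mem_iff, PySem.Set.mem_inter]
      simp only [pvZx, pvZy, PySem.Set.mem_ofList, List.mem_map, List.mem_filter, beq_iff_eq]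
      constructor
      · rcases h13 with ⟨b, hbR, hb1, hb2⟩
        exact ⟨b, ⟨hbR, hb1⟩, hb2⟩
      · rcases h23 with ⟨b, hbR, hb1, hb2⟩
        exact ⟨b, ⟨hbR, hb1⟩, hb2⟩

theorem pvMainEq (R : List (Int × Int × Int)) :
    RandomBlockSet2FilledBlockSet R = RandomBlockSet2FilledBlockSet_alt R := by
  have hA := (pvLA_pairwise R).filter (pvCond R)
  have hB := pvLB_pairwise R
  have hndA : ((pvLA R).filter (pvCond R)).Nodup :=
    hA.imp (fun {a b} h => fun he => absurd (he ▸ h) (lt_irrefl _))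
  have hndB : (pvLB R).Nodup :=
    hB.imp (fun {a b} h => fun he => absurd (he ▸ h) (lt_irrefl _))
  rw [pvA_eq, pvB_eq, PySem.Set.ofList_eq_self_of_nodup _ hndA,
      PySem.Set.ofList_eq_self_of_nodup _ hndB]
  apply pvSortedExt pvKey3 pvKey3_inj _ _ hA hB
  intro t
  rw [pvMemFilterLA, pvMemLB]
  constructor
  · rintro ⟨_, h12, h23, h13⟩
    exact ⟨h12, h13, h23⟩
  · rintro ⟨h12, h13, h23⟩
    refine ⟨⟨h12.imp (fun b hb => ⟨hb.1, hb.2.1⟩), h12.imp (fun b hb => ⟨hb.1, hb.2.2⟩),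
             h13.imp (fun b hb => ⟨hb.1, hb.2.2⟩)⟩, h12, h23, h13⟩

-- ===== VERDICT (by name: the statement is the Claim_ definition above) =====
theorem RandomBlockSet2FilledBlockSet_spec : Claim_equal_RandomBlockSet2FilledBlockSet := by
  intro R _
  unfold Spec_RandomBlockSet2FilledBlockSet
  exact pvMainEq R
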